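-- pv_equiv track=rewrite | github.com/TobisMa/BWINF-Runde40 | Runde1/j2/j2.py | solve
-- ===== SOURCE A (Python) =====
-- from typing import Dict, Tuple, List
--
-- def get_best_type_of_date(table: List[List[int]]) -> Dict[int, int]:
--     """Bestimmt die angenehmste Art von Termin jeder Person und gibt
--        das dabei entsehende Dictionary zurück.
--
--     Args:
--         table (List[List[int]]): die Präferenztabelle
--
--     Returns:
--         Dict[int, int]: das Dictionary, welches die angenehmste Art von Termin jeder Person beinhaltet
--     """
--     return {i: min(person_dates) for i, person_dates in enumerate(table)}
--
-- def solve(table: List[List[int]]) -> Tuple[List[int], int]: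
--     """Berechnet den/die besten Termin(e) und dessen/deren notwenidgen Änderungen
--
--     Args:
--         table (List[List[int]]): die Pröferenztabelle
--
--     Returns:
--         Tuple[List[int], int]: An erster Stelle alle Spalten
--     """
--     persons_best_type_of_date = get_best_type_of_date(table)
--
--     columns_in_row = len(table[0])  # Annahme: Jede Zeile hat dieselbe Anzahl von Werten,
--                                     # was der Fall in einer Tabelle ist
--     res_columns = []
--     res_changes: int = len(table)  # mindestens die Änderungen in einer anderen Spalte
--                                    # sind größer
--
--     for column in range(columns_in_row):
--         # berechnen der Änderungen
--         changes = 0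
--         for row in range(len(table)):
--             if table[row][column] > persons_best_type_of_date[row]:
--                 changes += 1
--
--         # speichervariable nach den 3 Optionen anpassen
--         if changes < res_changes:
--             res_changes = changes
--             res_columns = [column]  # aktuelle Spalte ist die erste mit den neuen wenigsten Änderungen
--
--         elif changes == res_changes:
--             res_columns.append(column)
--
--     return res_columns, res_changes
-- ===== SOURCE B (Python) =====
-- def solve(table):
--     cols = len(table[0])
--     changes = [0] * cols
--     for row in table:
--         m = min(row)
--         changes = [ch + (1 if v > m else 0) for ch, v in zip(changes, row)]
--     best = min(changes)
--     return [c for c, v in enumerate(changes) if v == best], best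
-- ===== Notes on version B (the rewrite author's own statement) =====
-- stated objective: alternative
-- what changed: B inverts the loop nesting (row-major over the table instead of column-major index loops), drops the row->min dict, builds the full per-column change-count list with zipWith-style updates, and then selects the minimum and its columns in two separate passes, replacing A's sentinel-initialized running argmin.
import Mathlib
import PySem

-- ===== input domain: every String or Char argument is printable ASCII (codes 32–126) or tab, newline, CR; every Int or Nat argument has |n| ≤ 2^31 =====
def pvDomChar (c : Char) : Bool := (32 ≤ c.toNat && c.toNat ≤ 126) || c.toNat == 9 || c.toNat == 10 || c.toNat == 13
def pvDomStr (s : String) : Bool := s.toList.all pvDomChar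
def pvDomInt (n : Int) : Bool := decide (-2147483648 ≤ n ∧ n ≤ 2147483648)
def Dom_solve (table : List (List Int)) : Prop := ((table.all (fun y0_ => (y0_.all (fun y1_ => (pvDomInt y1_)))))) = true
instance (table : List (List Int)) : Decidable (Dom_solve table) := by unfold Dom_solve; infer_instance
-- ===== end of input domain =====

-- B inverts A's loop nesting (row-major), builds the full per-column count list, then selects
-- the minimum and its columns in two separate passes instead of A's running argmin; same cost.


-- ===== PORT A =====
-- {i: min(person_dates) for i, person_dates in enumerate(table)}; min([]) raises ValueError
-- (min? = none there) — Pre_solve excludes empty rows, so the `.getD 0` default is never reached.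
def getBestTypeOfDate (table : List (List Int)) : PySem.Dict Int Int :=
  (PySem.List.enumerate table).foldl
    (fun d p => d.insert p.1 ((PySem.List.min? p.2 (fun x => x)).getD 0)) PySem.Dict.empty

-- table[0] raises IndexError on the empty table (pyGet? = none); Pre_solve excludes it,
-- so the `.getD []` defaults below are never reached; likewise table[row][column] on ragged rows.
def solve (table : List (List Int)) : List Int × Int :=
  let best := getBestTypeOfDate table
  let columnsInRow : Int := ((PySem.List.pyGet? table 0).getD []).length
  (PySem.List.pyRange 0 columnsInRow 1).foldl
    (fun s column =>
      let changes : Int := (PySem.List.pyRange 0 (table.length : Int) 1).foldl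
        (fun ch row =>
          if PySem.List.pyGetD (PySem.List.pyGetD table row []) column 0 > best.getD row 0
          then ch + 1 else ch) 0
      if changes < s.2 then ([column], changes)
      else if changes = s.2 then (s.1 ++ [column], s.2)
      else s)
    ([], (table.length : Int))

-- ===== PORT B =====
def solve_alt (table : List (List Int)) : List Int × Int :=
  let cols := ((PySem.List.pyGet? table 0).getD []).length
  let changes : List Int := table.foldl
    (fun ch r =>
      let m := (PySem.List.min? r (fun x => x)).getD 0
      List.zipWith (fun c v => c + if v > m then (1 : Int) else 0) ch r)
    (List.replicate cols (0 : Int))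
  let best := (PySem.List.min? changes (fun x => x)).getD 0
  (((PySem.List.enumerate changes).filter (fun p => p.2 == best)).map (fun p => p.1), best)

-- ===== PRECONDITION & SPEC =====
-- Exactly the inputs where A returns: a nonempty table whose rows are nonempty and at least
-- as long as the first row (otherwise min()/table[0]/table[row][column] raises).
def Pre_solve (table : List (List Int)) : Prop :=
  table ≠ [] ∧ ∀ r ∈ table, r ≠ [] ∧ (table.headD []).length ≤ r.length
instance (table : List (List Int)) : Decidable (Pre_solve table) := by unfold Pre_solve; infer_instance

def pvWitness_solve : List (List Int) := [[1, 2], [2, 1]]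

def Spec_solve (table : List (List Int)) (out : List Int × Int) : Prop := out = solve_alt table
instance (table : List (List Int)) (out : List Int × Int) : Decidable (Spec_solve table out) := by unfold Spec_solve; infer_instance

-- ===== CLAIM (what is proved, stated in full; the proofs are below) =====
def Claim_equal_solve : Prop := ∀ (table : List (List Int)), Dom_solve table → Pre_solve table → Spec_solve table (solve table)

-- ===== LEMMAS AND PROOFS =====

-- per-row minimum as A and B both compute it
def pvMin (r : List Int) : Int := (PySem.List.min? r (fun x => x)).getD 0

-- the number of rows whose entry in column c exceeds their own minimum
def pvCnt (table : List (List Int)) (c : Int) : Int :=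
  (table.countP (fun r => decide (pvMin r < PySem.List.pyGetD r c 0)) : Int)

-- the value A's column fold compares: running minimum of pvCnt over a range, seeded with table.length
-- (general helpers about min-folds and the running-argmin loop shape, specific to these two programs)

theorem pvFoldlMinHelper (t : List Int) : ∀ (a b : Int), t.foldl min (min a b) = min a (t.foldl min b) := by
  induction t with
  | nil => intro a b; simp
  | cons x t ih =>
    intro a b
    simp only [List.foldl_cons]
    rw [min_assoc, ih]

theorem pvFoldlMinProjLe (gf : Int → Int) (cs : List Int) : ∀ (m : Int),
    cs.foldl (fun a c => min a (gf c)) m ≤ m := by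
  induction cs with
  | nil => intro m; simp
  | cons c cs ih =>
    intro m
    simp only [List.foldl_cons]
    exact le_trans (ih (min m (gf c))) (min_le_left _ _)

-- A's running-argmin loop, in closed form
theorem pvRunfold (gf : Int → Int) (cs : List Int) : ∀ (R : List Int) (m : Int),
    cs.foldl (fun s c =>
        let changes := gf c
        if changes < s.2 then ([c], changes)
        else if changes = s.2 then (s.1 ++ [c], s.2) else s) (R, m)
    = ((if m = cs.foldl (fun a c => min a (gf c)) m then R else []) ++
        cs.filter (fun c => gf c == cs.foldl (fun a c => min a (gf c)) m),
       cs.foldl (fun a c => min a (gf c)) m) := by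
  induction cs with
  | nil => intro R m; simp
  | cons c cs ih =>
    intro R m
    simp only [List.foldl_cons]
    rcases lt_trichotomy (gf c) m with h1 | h1 | h1
    · have hmin : min m (gf c) = gf c := min_eq_right h1.le
      rw [if_pos h1]
      simp only [hmin]
      rw [ih]
      have hMle : cs.foldl (fun a c => min a (gf c)) (gf c) ≤ gf c := pvFoldlMinProjLe _ _ _
      have hm : ¬ (m = cs.foldl (fun a c => min a (gf c)) (gf c)) := by omega
      rw [if_neg hm, List.filter_cons]
      by_cases hc : gf c = cs.foldl (fun a c => min a (gf c)) (gf c)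
      · rw [if_pos hc, if_pos (beq_iff_eq.mpr hc)]
        simp
      · rw [if_neg hc, if_neg (by simp only [beq_iff_eq]; exact hc)]
    · have hmin : min m (gf c) = m := min_eq_left h1.ge
      rw [if_neg (by omega), if_pos h1]
      simp only [hmin]
      rw [ih]
      rw [List.filter_cons]
      by_cases hm : m = cs.foldl (fun a c => min a (gf c)) m
      · rw [if_pos hm, if_pos hm]
        have hbc : (gf c == cs.foldl (fun a c => min a (gf c)) m) = true := by
          simp only [beq_iff_eq]; omega
        simp [hbc]
      · rw [if_neg hm, if_neg hm]
        have hbc : ¬ (gf c == cs.foldl (fun a c => min a (gf c)) m) = true := by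
          simp only [beq_iff_eq]; omega
        simp [hbc]
    · have hmin : min m (gf c) = m := min_eq_left h1.le
      rw [if_neg (by omega), if_neg (by omega)]
      simp only [hmin]
      rw [ih]
      have hMle : cs.foldl (fun a c => min a (gf c)) m ≤ m := pvFoldlMinProjLe _ _ _
      rw [List.filter_cons]
      have hbc : ¬ (gf c == cs.foldl (fun a c => min a (gf c)) m) = true := by
        simp only [beq_iff_eq]; omega
      simp [hbc]

-- the dict A builds maps each row index to that row's minimum
theorem pvBestDict_items (table : List (List Int)) :
    (getBestTypeOfDate table).items
      = (PySem.List.enumerate table).map (fun p => (p.1, pvMin p.2)) := by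
  unfold getBestTypeOfDate
  have h1 : ∀ a ∈ PySem.List.enumerate table,
      (PySem.Dict.empty : PySem.Dict Int Int).contains ((fun (p : Int × List Int) => p.1) a) = false := by
    intro a _; simp
  have h2 : ((PySem.List.enumerate table).map (fun (p : Int × List Int) => p.1)).Nodup := by
    rw [PySem.List.map_fst_enumerate]
    exact PySem.List.nodup_pyRange_one 0 _
  have := PySem.Dict.items_foldl_insert_fresh
    (l := PySem.List.enumerate table)
    (k := fun (p : Int × List Int) => p.1)
    (v := fun (p : Int × List Int) => (PySem.List.min? p.2 (fun x => x)).getD 0)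
    (d := PySem.Dict.empty) h1 h2
  simpa [pvMin] using this

theorem pvBestDict_keys_nodup (table : List (List Int)) :
    (getBestTypeOfDate table).keys.Nodup := by
  have h : (getBestTypeOfDate table).keys
      = ((PySem.List.enumerate table).map (fun p => (p.1, pvMin p.2))).map (fun p => p.1) := by
    simp only [PySem.Dict.keys, pvBestDict_items]
  rw [h, List.map_map]
  have : ((fun (p : Int × Int) => p.1) ∘ (fun (p : Int × List Int) => (p.1, pvMin p.2)))
      = fun (p : Int × List Int) => p.1 := rfl
  rw [this, PySem.List.map_fst_enumerate]
  exact PySem.List.nodup_pyRange_one 0 _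

theorem pvBestDict_getD (table : List (List Int)) (k : Nat) (hk : k < table.length) :
    (getBestTypeOfDate table).getD (k : Int) 0 = pvMin table[k] := by
  apply PySem.Dict.getD_of_mem_items
  · rw [pvBestDict_items]
    refine List.mem_map.mpr ⟨((k : Int), table[k]), ?_, rfl⟩
    rw [PySem.List.mem_enumerate_iff]
    exact ⟨k, hk, by simp⟩
  · exact pvBestDict_keys_nodup table

-- A's inner row loop counts the rows whose entry in this column exceeds their minimum
theorem pvInner_eq (table : List (List Int)) (c : Int) :
    (PySem.List.pyRange 0 (table.length : Int) 1).foldl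
      (fun ch row =>
        if PySem.List.pyGetD (PySem.List.pyGetD table row []) c 0
            > (getBestTypeOfDate table).getD row 0
        then ch + 1 else ch) 0 = pvCnt table c := by
  have hcongr : ∀ (ch : Int) (row : Int), row ∈ PySem.List.pyRange 0 (table.length : Int) 1 →
      (if PySem.List.pyGetD (PySem.List.pyGetD table row []) c 0
          > (getBestTypeOfDate table).getD row 0
        then ch + 1 else ch)
      = (if pvMin (PySem.List.pyGetD table row []) < PySem.List.pyGetD (PySem.List.pyGetD table row []) c 0
        then ch + 1 else ch) := by
    intro ch row hrow
    rw [PySem.List.mem_pyRange_one] at hrow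
    obtain ⟨h0, hlt⟩ := hrow
    have hrk : row = ((row.toNat : Nat) : Int) := by omega
    have hklt : row.toNat < table.length := by omega
    rw [hrk, PySem.List.pyGetD_natCast, List.getD_eq_getElem _ _ hklt,
        pvBestDict_getD table row.toNat hklt]
  have h2 : (PySem.List.pyRange 0 (table.length : Int) 1).foldl
      (fun (ch : Int) row =>
        if pvMin (PySem.List.pyGetD table row []) < PySem.List.pyGetD (PySem.List.pyGetD table row []) c 0
        then ch + 1 else ch) 0 = pvCnt table c := by
    rw [PySem.List.foldl_pyRange_zero_pyGetD' table []
        (fun ch r => if pvMin r < PySem.List.pyGetD r c 0 then ch + 1 else ch) 0]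
    rw [PySem.List.foldl_ite_add_one]
    simp [pvCnt]
  exact (PySem.List.foldl_congr_mem _ _ _ 0 hcongr).trans h2

-- A in closed form: filter/min of the per-column counts over the column range
theorem pvSolveA (table : List (List Int)) :
    solve table =
      ((PySem.List.pyRange 0 (((PySem.List.pyGet? table 0).getD []).length : Int) 1).filter
          (fun c => pvCnt table c ==
            (PySem.List.pyRange 0 (((PySem.List.pyGet? table 0).getD []).length : Int) 1).foldl
              (fun a c => min a (pvCnt table c)) (table.length : Int)),
        (PySem.List.pyRange 0 (((PySem.List.pyGet? table 0).getD []).length : Int) 1).foldl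
          (fun a c => min a (pvCnt table c)) (table.length : Int)) := by
  show (PySem.List.pyRange 0 (((PySem.List.pyGet? table 0).getD []).length : Int) 1).foldl
      (fun s column =>
        let changes : Int := (PySem.List.pyRange 0 (table.length : Int) 1).foldl
          (fun ch row =>
            if PySem.List.pyGetD (PySem.List.pyGetD table row []) column 0
                > (getBestTypeOfDate table).getD row 0
            then ch + 1 else ch) 0
        if changes < s.2 then ([column], changes)
        else if changes = s.2 then (s.1 ++ [column], s.2)
        else s)
      ([], (table.length : Int)) = _
  have hstep : (fun (s : List Int × Int) (column : Int) =>
        let changes : Int := (PySem.List.pyRange 0 (table.length : Int) 1).foldl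
          (fun ch row =>
            if PySem.List.pyGetD (PySem.List.pyGetD table row []) column 0
                > (getBestTypeOfDate table).getD row 0
            then ch + 1 else ch) 0
        if changes < s.2 then ([column], changes)
        else if changes = s.2 then (s.1 ++ [column], s.2)
        else s)
      = (fun (s : List Int × Int) (c : Int) =>
        let changes := pvCnt table c
        if changes < s.2 then ([c], changes)
        else if changes = s.2 then (s.1 ++ [c], s.2)
        else s) := by
    funext s c
    simp only []
    rw [pvInner_eq]
  rw [hstep, pvRunfold]
  simp

-- (range L).map (getD ·) reconstructs a list of length L
theorem pvMapGetDRange (ch : List Int) :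
    (List.range ch.length).map (fun k => ch.getD k 0) = ch := by
  apply List.ext_getElem
  · simp
  · intro k h1 h2
    simp [List.getElem?_eq_getElem h2]

-- B's row loop builds exactly the per-column counts
theorem pvBfold (t : List (List Int)) : ∀ (L : Nat) (ch : List Int), ch.length = L →
    (∀ r ∈ t, L ≤ r.length) →
    t.foldl (fun ch r =>
        List.zipWith (fun c v => c + if v > pvMin r then (1 : Int) else 0) ch r) ch
    = (List.range L).map (fun k =>
        ch.getD k 0 + (t.countP (fun r => decide (pvMin r < r.getD k 0)) : Int)) := by
  induction t with
  | nil =>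
    intro L ch hlen _
    simp only [List.foldl_nil, List.countP_nil, Nat.cast_zero, add_zero]
    rw [← hlen]
    exact (pvMapGetDRange ch).symm
  | cons r t ih =>
    intro L ch hlen hrows
    simp only [List.foldl_cons]
    have hrL : L ≤ r.length := hrows r (List.mem_cons_self)
    have hzw : (List.zipWith (fun c v => c + if v > pvMin r then (1 : Int) else 0) ch r).length = L := by
      simp [List.length_zipWith]; omega
    rw [ih L _ hzw (fun r' hr' => hrows r' (List.mem_cons_of_mem _ hr'))]
    apply List.map_congr_left
    intro k hk
    rw [List.mem_range] at hk
    have hkch : k < ch.length := by omega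
    have hkr : k < r.length := by omega
    have hkzw : k < (List.zipWith (fun c v => c + if v > pvMin r then (1 : Int) else 0) ch r).length := by
      omega
    rw [List.getD_eq_getElem _ _ hkzw, List.getElem_zipWith,
        List.getD_eq_getElem _ _ hkch]
    simp only [List.countP_cons, List.getD_eq_getElem _ _ hkr]
    by_cases hp : pvMin r < r[k]
    · simp only [hp, decide_true]
      push_cast
      ring
    · simp only [hp, decide_false]
      push_cast
      ring

-- ===== VERDICT (by name: the statement is the Claim_ definition above) =====
theorem solve_spec : Claim_equal_solve := by
  intro table _ hPre
  unfold Spec_solve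
  obtain ⟨hne, hrows⟩ := hPre
  obtain ⟨h, t, rfl⟩ : ∃ h t, table = h :: t := by
    cases table with
    | nil => exact absurd rfl hne
    | cons h t => exact ⟨h, t, rfl⟩
  set table := h :: t with htab
  have hh : h ≠ [] := (hrows h (by simp [htab])).1
  -- the column count
  have hcols : ((PySem.List.pyGet? table 0).getD []).length = h.length := by
    simp [htab]
  set cols := h.length with hcolsdef
  have hcolspos : 0 < cols := by
    cases h with
    | nil => exact absurd rfl hh
    | cons _ _ => simp [hcolsdef]
  have hrowlen : ∀ r ∈ table, cols ≤ r.length := by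
    intro r hr
    have := (hrows r hr).2
    simpa [htab] using this
  -- the shared per-column count list
  set cntlist := (List.range cols).map (fun (k : Nat) => pvCnt table (k : Int)) with hcnt
  have hcntlen : cntlist.length = cols := by simp [hcnt]
  have hcntget : ∀ (k : Nat), k < cols → cntlist.getD k 0 = pvCnt table (k : Int) := by
    intro k hk
    have : k < cntlist.length := by omega
    rw [List.getD_eq_getElem _ _ this]
    simp [hcnt]
  -- counts are bounded by the number of rows
  have hcntle : ∀ c : Int, pvCnt table c ≤ (table.length : Int) := by
    intro c
    unfold pvCnt
    exact_mod_cast List.countP_le_length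
  -- B's changes list equals cntlist
  have hchanges :
      table.foldl (fun ch r =>
          List.zipWith (fun c v => c + if v > (PySem.List.min? r (fun x => x)).getD 0 then (1 : Int) else 0) ch r)
        (List.replicate cols (0 : Int)) = cntlist := by
    have hstep : (fun (ch : List Int) (r : List Int) =>
          List.zipWith (fun c v => c + if v > (PySem.List.min? r (fun x => x)).getD 0 then (1 : Int) else 0) ch r)
        = (fun (ch : List Int) (r : List Int) =>
          List.zipWith (fun c v => c + if v > pvMin r then (1 : Int) else 0) ch r) := rfl
    rw [hstep, pvBfold table cols (List.replicate cols 0) (by simp) hrowlen, hcnt]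
    apply List.map_congr_left
    intro k hk
    rw [List.mem_range] at hk
    rw [List.getD_eq_getElem _ _ (by simpa using hk), List.getElem_replicate]
    unfold pvCnt
    have : ∀ r : List Int, PySem.List.pyGetD r ((k : Nat) : Int) 0 = r.getD k 0 := by
      intro r; rw [PySem.List.pyGetD_natCast]
    simp only [this]
    ring
  -- the minimum A's fold computes equals B's best
  have hMfold : (PySem.List.pyRange 0 (cols : Int) 1).foldl
        (fun a c => min a (pvCnt table c)) (table.length : Int)
      = cntlist.foldl min (table.length : Int) := by
    rw [PySem.List.pyRange_zero_natCast, hcnt, List.foldl_map, List.foldl_map]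
  obtain ⟨c0, rest, hcnl⟩ : ∃ c0 rest, cntlist = c0 :: rest := by
    cases hcn : cntlist with
    | nil => rw [hcn] at hcntlen; simp at hcntlen; omega
    | cons c0 rest => exact ⟨c0, rest, rfl⟩
  have hc0 : c0 = pvCnt table ((0 : Nat) : Int) := by
    have h0 : cntlist.getD 0 0 = pvCnt table ((0 : Nat) : Int) := hcntget 0 hcolspos
    rw [hcnl] at h0
    simpa using h0
  have hbest : (PySem.List.min? cntlist (fun x => x)).getD 0 = rest.foldl min c0 := by
    rw [hcnl, PySem.List.min?_id_cons]
    rfl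
  have hminle : rest.foldl min c0 ≤ c0 := (PySem.List.foldl_min_le rest c0).1
  have hc0le : c0 ≤ (table.length : Int) := by rw [hc0]; exact hcntle _
  have hMeq : cntlist.foldl min (table.length : Int) = rest.foldl min c0 := by
    rw [hcnl, List.foldl_cons, pvFoldlMinHelper]
    exact min_eq_right (by omega)
  -- rewrite both sides
  rw [pvSolveA]
  show _ = solve_alt table
  -- unfold solve_alt (zeta-reduced)
  show _ =
    (((PySem.List.enumerate
        (table.foldl (fun ch r =>
            List.zipWith (fun c v => c + if v > (PySem.List.min? r (fun x => x)).getD 0 then (1 : Int) else 0) ch r)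
          (List.replicate ((PySem.List.pyGet? table 0).getD []).length (0 : Int)))).filter
        (fun p => p.2 == (PySem.List.min?
          (table.foldl (fun ch r =>
              List.zipWith (fun c v => c + if v > (PySem.List.min? r (fun x => x)).getD 0 then (1 : Int) else 0) ch r)
            (List.replicate ((PySem.List.pyGet? table 0).getD []).length (0 : Int))) (fun x => x)).getD 0)).map
      (fun p => p.1),
     (PySem.List.min?
        (table.foldl (fun ch r =>
            List.zipWith (fun c v => c + if v > (PySem.List.min? r (fun x => x)).getD 0 then (1 : Int) else 0) ch r)
          (List.replicate ((PySem.List.pyGet? table 0).getD []).length (0 : Int))) (fun x => x)).getD 0)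
  rw [hcols, hchanges, hbest, hMfold, hMeq]
  -- B's enumerate/filter/map collapses to a filter over the column range
  have henum := PySem.List.enumerate_eq_map_pyRange cntlist 0
  rw [henum, List.filter_map, List.map_map]
  have hmapfst : ((fun (p : Int × Int) => p.1) ∘ (fun j => (j, PySem.List.pyGetD cntlist j 0)))
      = fun (j : Int) => j := rfl
  rw [hmapfst, List.map_id']
  have hlen2 : PySem.List.len cntlist = (cols : Int) := by
    simp [hcntlen]
  rw [hlen2]
  congr 1
  apply List.filter_congr
  intro j hj
  rw [PySem.List.mem_pyRange_one] at hj
  have hjk : j = ((j.toNat : Nat) : Int) := by omega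
  have hjlt : j.toNat < cols := by omega
  rw [Function.comp_apply, hjk, PySem.List.pyGetD_natCast, hcntget j.toNat hjlt]
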